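-- pv_equiv track=rewrite | github.com/stephenb101010/helsinki_intro_python | part06-19_incorrect_lottery_numbers/src/incorrect_lottery_numbers.py | are_numbers_valid
-- ===== SOURCE A (Python) =====
-- def are_numbers_valid(numbers: list):
--     try:
--         numbers = numbers.split(',')
--
--         if len(numbers) != 7:
--             return False
--
--         for num in numbers:
--             number = int(num)
--             if number < 1 or number > 39 or numbers.count(num) > 1:
--                 return False
--
--         return True
--
--     except:
--         return False
-- ===== SOURCE B (Python) =====
-- def are_numbers_valid(numbers: list):
--     tokens = numbers.split(',')
--     if len(tokens) != 7:
--         return False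
--     try:
--         values = [int(t) for t in tokens]
--     except ValueError:
--         return False
--     if any(v < 1 or v > 39 for v in values):
--         return False
--     ordered = sorted(tokens)
--     return all(a != b for a, b in zip(ordered, ordered[1:]))
-- ===== Notes on version B (the rewrite author's own statement) =====
-- stated objective: alternative
-- what changed: A's single loop that re-parses and runs a quadratic numbers.count(num) duplicate scan per token is replaced by phases: parse all tokens once (try/except around a comprehension), range-check the values, and detect duplicates by sorting the raw tokens and scanning once for an adjacent equal pair.
import Mathlib
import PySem

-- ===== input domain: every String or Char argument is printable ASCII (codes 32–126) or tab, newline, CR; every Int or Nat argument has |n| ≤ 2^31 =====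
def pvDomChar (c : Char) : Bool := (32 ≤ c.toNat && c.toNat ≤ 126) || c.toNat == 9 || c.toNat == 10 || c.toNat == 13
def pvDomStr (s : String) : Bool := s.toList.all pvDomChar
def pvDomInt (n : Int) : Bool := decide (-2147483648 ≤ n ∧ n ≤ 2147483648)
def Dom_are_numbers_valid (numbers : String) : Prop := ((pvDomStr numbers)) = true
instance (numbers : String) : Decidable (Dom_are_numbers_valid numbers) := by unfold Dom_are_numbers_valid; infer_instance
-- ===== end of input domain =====

-- B validates by phases (split, parse all, range-check all, sort-then-adjacent-scan for duplicates)
-- instead of A's single loop with a quadratic numbers.count(num) duplicate test; objective: alternative.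

-- ===== PORT A =====
-- the for-loop of A: each token is parsed (int() failure = the bare except = False),
-- range-checked, and duplicate-checked with count over the FULL token list `all`
def pvGoA (all : List String) : List String → Bool
  | [] => true
  | t :: rest =>
    match PySem.Int.ofStr? t with
    | none => false
    | some n =>
      if n < 1 ∨ 39 < n ∨ 1 < PySem.List.count all t then false
      else pvGoA all rest

def are_numbers_valid (numbers : String) : Bool :=
  -- numbers.split(',') : sep is the nonempty literal ",", so split? is always `some`
  let toks := (PySem.Str.split? numbers ",").getD []
  if toks.length ≠ 7 then false else pvGoA toks toks

-- ===== PORT B =====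
-- [int(t) for t in tokens] with except ValueError → False : none = some token failed to parse
def pvParseAll : List String → Option (List Int)
  | [] => some []
  | t :: rest =>
    match PySem.Int.ofStr? t with
    | none => none
    | some n =>
      match pvParseAll rest with
      | none => none
      | some ns => some (n :: ns)

-- all(a != b for a, b in zip(ordered, ordered[1:])) : adjacent pairs all distinct
def pvNoAdjDup : List String → Bool
  | a :: b :: rest => decide (a ≠ b) && pvNoAdjDup (b :: rest)
  | _ => true

def are_numbers_valid_alt (numbers : String) : Bool :=
  let tokens := (PySem.Str.split? numbers ",").getD []
  if tokens.length ≠ 7 then false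
  else
    match pvParseAll tokens with
    | none => false
    | some values =>
      if values.any (fun v => v < 1 || 39 < v) then false
      else pvNoAdjDup (PySem.List.sorted tokens (fun x => x) false)

-- ===== PRECONDITION & SPEC =====
def Spec_are_numbers_valid (numbers : String) (out : Bool) : Prop := out = are_numbers_valid_alt numbers
instance (numbers : String) (out : Bool) : Decidable (Spec_are_numbers_valid numbers out) := by unfold Spec_are_numbers_valid; infer_instance

-- ===== CLAIM (what is proved, stated in full; the proofs are below) =====
def Claim_equal_are_numbers_valid : Prop := ∀ (numbers : String), Dom_are_numbers_valid numbers → Spec_are_numbers_valid numbers (are_numbers_valid numbers)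

-- ===== LEMMAS AND PROOFS =====

-- A's loop is true iff every token parses, lies in range, and occurs at most once in `all`
theorem pvGoA_eq_true_iff (all l : List String) :
    pvGoA all l = true ↔
      ∀ t ∈ l, ∃ n, PySem.Int.ofStr? t = some n ∧ 1 ≤ n ∧ n ≤ 39 ∧ PySem.List.count all t ≤ 1 := by
  induction l with
  | nil => simp [pvGoA]
  | cons t rest ih =>
    simp only [pvGoA]
    cases h : PySem.Int.ofStr? t with
    | none => simp [h]
    | some n =>
      change (if n < 1 ∨ 39 < n ∨ 1 < PySem.List.count all t then false else pvGoA all rest) = true ↔ _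
      by_cases hc : n < 1 ∨ 39 < n ∨ 1 < PySem.List.count all t
      · rw [if_pos hc]
        simp only [Bool.false_eq_true, false_iff]
        intro hall
        obtain ⟨m, hm, h1, h2, h3⟩ := hall t (by simp)
        rw [h] at hm; injection hm with hm; subst hm
        omega
      · simp only [if_neg hc, ih]
        push Not at hc
        constructor
        · intro hall s hs
          rcases List.mem_cons.mp hs with rfl | hs
          · exact ⟨n, h, by omega, by omega, by omega⟩
          · exact hall s hs
        · intro hall s hs
          exact hall s (List.mem_cons_of_mem _ hs)

-- B's parse+range phases are true (reach the dedup check with `b`) iff every token parses in range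
theorem pvParseRange_iff (l : List String) (b : Bool) :
    (match pvParseAll l with
     | none => false
     | some values =>
       if values.any (fun v => v < 1 || 39 < v) then false else b) = true ↔
      (∀ t ∈ l, ∃ n, PySem.Int.ofStr? t = some n ∧ 1 ≤ n ∧ n ≤ 39) ∧ b = true := by
  induction l with
  | nil => simp [pvParseAll]
  | cons t rest ih =>
    simp only [pvParseAll]
    cases h : PySem.Int.ofStr? t with
    | none => simp [h]
    | some n =>
      cases hp : pvParseAll rest with
      | none =>
        simp only [hp] at ih
        change false = true ↔ _
        simp only [Bool.false_eq_true, false_iff] at ih ⊢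
        intro hcon
        exact ih ⟨fun s hs => hcon.1 s (List.mem_cons_of_mem _ hs), hcon.2⟩
      | some ns =>
        simp only [hp] at ih
        change (if ((n :: ns).any fun v => decide (v < 1) || decide (39 < v)) = true then false else b) = true ↔ _
        by_cases hn : n < 1 ∨ 39 < n
        · have : (List.any (n :: ns) fun v => v < 1 || 39 < v) = true := by
            simp only [List.any_cons, Bool.or_eq_true, decide_eq_true_eq]
            left
            omega
          rw [if_pos this]
          simp only [Bool.false_eq_true, false_iff]
          intro hcon
          obtain ⟨m, hm, h1, h2⟩ := hcon.1 t (by simp)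
          rw [h] at hm; injection hm with hm; subst hm
          omega
        · have hsplit : (List.any (n :: ns) fun v => v < 1 || 39 < v)
              = (List.any ns fun v => v < 1 || 39 < v) := by
            simp only [List.any_cons]
            have : ((n < 1 || 39 < n : Bool)) = false := by
              simp only [Bool.or_eq_false_iff, decide_eq_false_iff_not]
              omega
            simp [this]
          rw [hsplit, ih]
          constructor
          · rintro ⟨hall, hb⟩
            refine ⟨fun s hs => ?_, hb⟩
            rcases List.mem_cons.mp hs with rfl | hs
            · exact ⟨n, h, by omega, by omega⟩
            · exact hall s hs
          · rintro ⟨hall, hb⟩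
            exact ⟨fun s hs => hall s (List.mem_cons_of_mem _ hs), hb⟩

-- a list whose elements are pairwise distinct has no adjacent duplicates
theorem pvNoAdjDup_of_pairwise_ne : ∀ (l : List String), l.Pairwise (· ≠ ·) → pvNoAdjDup l = true
  | [], _ => rfl
  | [_], _ => rfl
  | a :: b :: r, h => by
      rw [List.pairwise_cons] at h
      simp only [pvNoAdjDup, Bool.and_eq_true, decide_eq_true_eq]
      exact ⟨h.1 b (by simp), pvNoAdjDup_of_pairwise_ne (b :: r) h.2⟩

-- a ≤-sorted list with no adjacent duplicates is strictly increasing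
theorem pairwise_lt_of_noAdjDup : ∀ (l : List String),
    l.Pairwise (· ≤ ·) → pvNoAdjDup l = true → l.Pairwise (· < ·)
  | [], _, _ => List.Pairwise.nil
  | [_], _, _ => by simp
  | a :: b :: r, hle, hna => by
      simp only [pvNoAdjDup, Bool.and_eq_true, decide_eq_true_eq] at hna
      rw [List.pairwise_cons] at hle ⊢
      have hrec := pairwise_lt_of_noAdjDup (b :: r) hle.2 hna.2
      have hab : a < b := lt_of_le_of_ne (hle.1 b (by simp)) hna.1
      refine ⟨fun x hx => ?_, hrec⟩
      rcases List.mem_cons.mp hx with rfl | hx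
      · exact hab
      · exact lt_trans hab ((List.pairwise_cons.mp hrec).1 x hx)

-- on the sorted copy, no adjacent duplicates ↔ the original tokens are pairwise distinct
theorem pvNoAdjDup_sorted_iff (l : List String) :
    pvNoAdjDup (PySem.List.sorted l (fun x => x) false) = true ↔ l.Nodup := by
  have hperm := PySem.List.sorted_perm l (fun x => x) false
  have hpw := PySem.List.sorted_pairwise l (fun x => x)
  constructor
  · intro h
    exact hperm.nodup_iff.mp ((pairwise_lt_of_noAdjDup _ hpw h).imp ne_of_lt)
  · intro h
    exact pvNoAdjDup_of_pairwise_ne _ (hperm.nodup_iff.mpr h)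

-- ===== VERDICT (by name: the statement is the Claim_ definition above) =====
theorem are_numbers_valid_spec : Claim_equal_are_numbers_valid := by
  intro numbers _
  unfold Spec_are_numbers_valid are_numbers_valid are_numbers_valid_alt
  set toks := (PySem.Str.split? numbers ",").getD [] with htoks
  by_cases hlen : toks.length ≠ 7
  · simp [hlen]
  · simp only [if_neg hlen]
    rw [Bool.eq_iff_iff, pvGoA_eq_true_iff, pvParseRange_iff, pvNoAdjDup_sorted_iff]
    have hcount : (∀ t ∈ toks, PySem.List.count toks t ≤ 1) ↔ toks.Nodup := by
      constructor
      · intro h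
        rw [List.nodup_iff_count_le_one]
        intro a
        by_cases ha : a ∈ toks
        · simpa [PySem.List.count_eq] using h a ha
        · simp [List.count_eq_zero_of_not_mem ha]
      · intro h t _
        rw [PySem.List.count_eq]
        exact List.nodup_iff_count_le_one.mp h t
    constructor
    · intro hall
      refine ⟨fun t ht => ?_, hcount.mp (fun t ht => (hall t ht).choose_spec.2.2.2)⟩
      obtain ⟨n, h1, h2, h3, _⟩ := hall t ht
      exact ⟨n, h1, h2, h3⟩
    · rintro ⟨hall, hnd⟩ t ht
      obtain ⟨n, h1, h2, h3⟩ := hall t ht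
      exact ⟨n, h1, h2, h3, hcount.mpr hnd t ht⟩
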